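-- pv_equiv track=rewrite | github.com/JemPak/PyProjects | ConversionesBinarias.py | BabilonioaDecimal
-- ===== SOURCE A (Python) =====
-- def BabilonioaDecimal(nums: list) -> int:
--    ''' Esta funcion convierte un numero babilonio a un numero árabigo
--       Ejm:
--          lista = [ "<<<y", "yy<", "<<"]
--       se recorre la lista y la suma de cada elemento se multiplica por 60 a la n.
--    '''
--    base = 60
--    respuesta = 0
--    for index, value in enumerate(nums):
--       diez = value.count("<")
--       uno = value.count("y")
--       respuesta += ((diez*10)+uno)*(60**index)
--    return respuesta
-- ===== SOURCE B (Python) =====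
-- def BabilonioaDecimal(nums: list) -> int:
--     '''Horner's method: walk the digits most-significant-first (reversed list),
--     multiplying the accumulator by 60 at each step; no 60**index powers needed.'''
--     respuesta = 0
--     for value in reversed(nums):
--         respuesta = respuesta * 60 + value.count("<") * 10 + value.count("y")
--     return respuesta
-- ===== Notes on version B (the rewrite author's own statement) =====
-- stated objective: faster
-- what changed: Replaces the enumerate + 60**index power-sum with Horner's method over the reversed list (accumulator*60 + digit), eliminating the fresh 60**index exponentiation per element.
import Mathlib
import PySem

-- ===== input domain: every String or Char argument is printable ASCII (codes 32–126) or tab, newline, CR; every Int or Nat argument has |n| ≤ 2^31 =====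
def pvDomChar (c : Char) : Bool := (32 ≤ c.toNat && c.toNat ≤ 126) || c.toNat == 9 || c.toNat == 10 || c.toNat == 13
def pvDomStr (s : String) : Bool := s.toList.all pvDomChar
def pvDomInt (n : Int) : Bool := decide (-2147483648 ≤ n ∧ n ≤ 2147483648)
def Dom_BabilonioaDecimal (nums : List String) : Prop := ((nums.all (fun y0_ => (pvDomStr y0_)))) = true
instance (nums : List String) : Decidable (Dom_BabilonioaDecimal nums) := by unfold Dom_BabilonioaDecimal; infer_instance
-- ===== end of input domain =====

-- B replaces the enumerate + 60**index power-sum with Horner's method over the reversed list (alternative evaluation scheme, no exponentiation).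

-- ===== PORT A =====
def BabilonioaDecimal (nums : List String) : Int :=
  (PySem.List.enumerate nums 0).foldl
    (fun respuesta p =>
      let diez : Int := PySem.Str.count p.2 "<"
      let uno : Int := PySem.Str.count p.2 "y"
      respuesta + ((diez * 10) + uno) * (60 ^ p.1.toNat)) 0

-- ===== PORT B =====
def BabilonioaDecimal_alt (nums : List String) : Int :=
  nums.reverse.foldl
    (fun respuesta value =>
      respuesta * 60 + (PySem.Str.count value "<" : Int) * 10 + (PySem.Str.count value "y" : Int)) 0

-- ===== PRECONDITION & SPEC =====
def Spec_BabilonioaDecimal (nums : List String) (out : Int) : Prop := out = BabilonioaDecimal_alt nums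
instance (nums : List String) (out : Int) : Decidable (Spec_BabilonioaDecimal nums out) := by unfold Spec_BabilonioaDecimal; infer_instance

-- ===== CLAIM (what is proved, stated in full; the proofs are below) =====
def Claim_equal_BabilonioaDecimal : Prop := ∀ (nums : List String), Dom_BabilonioaDecimal nums → Spec_BabilonioaDecimal nums (BabilonioaDecimal nums)

-- ===== LEMMAS AND PROOFS =====

/-- A's power-sum fold, started at any index `s` and accumulator `acc`,
    equals `acc + 60^s * (Horner value of l)` (the Horner value written as a `foldr`). -/
theorem powersum_eq_horner (l : List String) (s : Nat) (acc : Int) :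
    (PySem.List.enumerate l (s : Int)).foldl
      (fun respuesta p =>
        let diez : Int := PySem.Str.count p.2 "<"
        let uno : Int := PySem.Str.count p.2 "y"
        respuesta + ((diez * 10) + uno) * (60 ^ p.1.toNat)) acc
    = acc + 60 ^ s *
        (l.foldr (fun value respuesta =>
          respuesta * 60 + (PySem.Str.count value "<" : Int) * 10 + (PySem.Str.count value "y" : Int)) 0) := by
  induction l generalizing s acc with
  | nil => simp [PySem.List.enumerate_nil]
  | cons x t ih =>
    rw [PySem.List.enumerate_cons]
    simp only [List.foldl_cons, List.foldr_cons]
    have hs : ((s : Int) + 1) = ((s + 1 : Nat) : Int) := by push_cast; ring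
    rw [hs, ih (s + 1)]
    have ht : ((s : Int)).toNat = s := Int.toNat_natCast s
    rw [ht]
    ring

theorem BabilonioaDecimal_spec : Claim_equal_BabilonioaDecimal := by
  intro nums _
  unfold Spec_BabilonioaDecimal BabilonioaDecimal BabilonioaDecimal_alt
  have h := powersum_eq_horner nums 0 0
  norm_num at h
  rw [List.foldl_reverse]
  exact h
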